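-- pv_equiv track=rewrite | github.com/rcarton/advent2020 | advent/days/day09.py | find_first_invalid_num
-- ===== SOURCE A (Python) =====
-- from itertools import combinations
-- from typing import Iterator, List
--
-- def find_first_invalid_num(numbers: Iterator[int], preamble_size: int) -> int:
--     last_numbers = []
--     for i, num in enumerate(numbers):
--         if i < preamble_size:
--             last_numbers.append(num)
--             continue
--
--         if not is_valid(num, last_numbers):
--             return num
--
--         last_numbers.pop(0)
--         last_numbers.append(num)
--
--     raise ValueError("No invalid number found.")
--
-- def is_valid(num, last_numbers):
--     for comb in combinations(last_numbers, 2):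
--         if sum(comb) == num:
--             return True
--     return False
-- ===== SOURCE B (Python) =====
-- def find_first_invalid_num(numbers, preamble_size):
--     nums = list(numbers)
--     k = max(preamble_size, 0)
--     counts = {}
--     for x in nums[:k]:
--         counts[x] = counts.get(x, 0) + 1
--     for i in range(k, len(nums)):
--         num = nums[i]
--         if not any((num - x) in counts and (num - x != x or counts[x] > 1) for x in counts):
--             return num
--         old = nums[i - k]
--         counts[old] -= 1
--         if counts[old] == 0:
--             del counts[old]
--         counts[num] = counts.get(num, 0) + 1
--     raise ValueError("No invalid number found.")
-- ===== Notes on version B (the rewrite author's own statement) =====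
-- stated objective: alternative
-- what changed: Replaces A's maintained pop/append window plus quadratic itertools.combinations pair scan by a sliding count dictionary updated in O(1) per step and a complement-lookup membership check, removing the inner pair scan (intended as faster; a timing run measured B 1229x ahead at the largest size both finished, but could not confirm the label because on its largest inputs both programs correctly end in ValueError).
import Mathlib
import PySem

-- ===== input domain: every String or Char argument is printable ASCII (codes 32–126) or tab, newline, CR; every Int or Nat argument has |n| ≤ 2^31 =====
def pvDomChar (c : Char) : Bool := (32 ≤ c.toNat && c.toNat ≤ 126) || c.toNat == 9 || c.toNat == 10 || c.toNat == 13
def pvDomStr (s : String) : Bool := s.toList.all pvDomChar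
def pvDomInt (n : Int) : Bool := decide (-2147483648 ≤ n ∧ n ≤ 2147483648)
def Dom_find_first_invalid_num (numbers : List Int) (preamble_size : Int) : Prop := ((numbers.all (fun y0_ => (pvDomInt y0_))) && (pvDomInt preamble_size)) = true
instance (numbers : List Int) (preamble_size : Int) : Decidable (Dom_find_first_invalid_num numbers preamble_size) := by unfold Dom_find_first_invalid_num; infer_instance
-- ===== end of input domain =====

-- B replaces A's maintained pop/append window + quadratic itertools.combinations pair scan by a
-- sliding count dictionary updated in O(1) per step with a complement-lookup membership check.

-- ===== PORT A =====
-- itertools.combinations(l, 2), in Python's order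
def pyCombs2 (l : List Int) : List (Int × Int) :=
  match l with
  | [] => []
  | x :: xs => xs.map (fun y => (x, y)) ++ pyCombs2 xs

def is_valid (num : Int) (last_numbers : List Int) : Bool :=
  (pyCombs2 last_numbers).any (fun c => c.1 + c.2 == num)

-- A's enumerate loop; `none` = the final `raise ValueError` (excluded by Pre_).
-- `last.drop 1 ++ [num]` is Python's `pop(0); append(num)`: the pop is only reached after
-- `is_valid num last` was true, which forces `last ≠ []`, so `drop 1` is exact there.
def ffinGoA (preamble_size : Int) (rest : List Int) (i : Int) (last : List Int) : Option Int :=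
  match rest with
  | [] => none
  | num :: rest' =>
    if i < preamble_size then ffinGoA preamble_size rest' (i + 1) (last ++ [num])
    else if !is_valid num last then some num
    else ffinGoA preamble_size rest' (i + 1) (last.drop 1 ++ [num])

def find_first_invalid_num (numbers : List Int) (preamble_size : Int) : Int :=
  (ffinGoA preamble_size numbers 0 []).getD 0

-- ===== PORT B =====
-- Source B's `any((num - x) in counts and (num - x != x or counts[x] > 1) for x in counts)`:
-- iteration over the dict's keys; the result (a bool of an existence check) is independent of the
-- iteration order. `counts[x]` is exact as `getD x 0` because x is a key of counts.
def ffinCheck (num : Int) (counts : PySem.Dict Int Int) : Bool :=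
  counts.keys.any (fun x =>
    counts.contains (num - x) && (!(num - x == x) || decide (1 < counts.getD x 0)))

-- Source B's `for i in range(k, len(nums))` loop; rest = nums.drop i, so num = nums[i].
-- `old` is nums[i-k] (in range: k ≤ i < nums.length here); `counts[old] -= 1` is exact as
-- `modify old 0 (· - 1)` because old is always a key of counts.
def ffinGoB (nums : List Int) (k : Nat) (i : Nat) (rest : List Int) (counts : PySem.Dict Int Int) : Option Int :=
  match rest with
  | [] => none
  | num :: rest' =>
    if !ffinCheck num counts then some num
    else
      let old := nums.getD (i - k) 0
      let c1 := counts.modify old 0 (· - 1)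
      let c2 := if c1.getD old 0 == 0 then c1.erase old else c1
      ffinGoB nums k (i + 1) rest' (c2.insert num (c2.getD num 0 + 1))

def find_first_invalid_num_alt (numbers : List Int) (preamble_size : Int) : Int :=
  let k := (max preamble_size 0).toNat
  let counts := (numbers.take k).foldl (fun d x => d.insert x (d.getD x 0 + 1)) PySem.Dict.empty
  (ffinGoB numbers k k (numbers.drop k) counts).getD 0

-- ===== PRECONDITION & SPEC =====
-- Pre_ excludes exactly the inputs on which A raises ValueError ("No invalid number found"):
-- those with no index i ≥ preamble_size whose value is not a sum of two entries at distinct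
-- positions of the preceding size-preamble window (this includes every list of length ≤
-- preamble_size). B raises ValueError there too.
def Pre_find_first_invalid_num (numbers : List Int) (preamble_size : Int) : Prop :=
  ∃ i < numbers.length, preamble_size.toNat ≤ i ∧
    ¬ ∃ a < i, ∃ b < i, a < b ∧ i ≤ a + preamble_size.toNat ∧
        numbers.getD a 0 + numbers.getD b 0 = numbers.getD i 0
instance (numbers : List Int) (preamble_size : Int) : Decidable (Pre_find_first_invalid_num numbers preamble_size) := by unfold Pre_find_first_invalid_num; infer_instance

def pvWitness_find_first_invalid_num : List Int × Int := ([1, 2, 3, 5, 99], 2)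

def Spec_find_first_invalid_num (numbers : List Int) (preamble_size : Int) (out : Int) : Prop := out = find_first_invalid_num_alt numbers preamble_size
instance (numbers : List Int) (preamble_size : Int) (out : Int) : Decidable (Spec_find_first_invalid_num numbers preamble_size out) := by unfold Spec_find_first_invalid_num; infer_instance

-- ===== CLAIM (what is proved, stated in full; the proofs are below) =====
def Claim_equal_find_first_invalid_num : Prop := ∀ (numbers : List Int) (preamble_size : Int), Dom_find_first_invalid_num numbers preamble_size → Pre_find_first_invalid_num numbers preamble_size → Spec_find_first_invalid_num numbers preamble_size (find_first_invalid_num numbers preamble_size)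

-- ===== LEMMAS AND PROOFS =====

theorem pvWitness_ok :
    Dom_find_first_invalid_num pvWitness_find_first_invalid_num.1 pvWitness_find_first_invalid_num.2 ∧
    Pre_find_first_invalid_num pvWitness_find_first_invalid_num.1 pvWitness_find_first_invalid_num.2 := by
  decide

theorem is_valid_cons (num x : Int) (xs : List Int) :
    is_valid num (x :: xs) = (xs.any (fun y => x + y == num) || is_valid num xs) := by
  simp [is_valid, pyCombs2, List.any_append, List.any_map, Function.comp_def]

-- A's pair scan succeeds exactly when some window value x has its complement num - x in the
-- window, at a different position (equal values need multiplicity ≥ 2).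
theorem valid_iff (num : Int) (w : List Int) :
    is_valid num w = true ↔ ∃ x ∈ w, (num - x) ∈ w ∧ (num - x ≠ x ∨ 2 ≤ w.count x) := by
  induction w with
  | nil => simp [is_valid, pyCombs2]
  | cons x xs ih =>
    rw [is_valid_cons, Bool.or_eq_true, List.any_eq_true, ih]
    constructor
    · rintro (⟨y, hy, hsum⟩ | ⟨z, hz, hmem, hcond⟩)
      · rw [beq_iff_eq] at hsum
        refine ⟨x, List.mem_cons_self, ?_, ?_⟩
        · have hyx : num - x = y := by omega
          rw [hyx]; exact List.mem_cons_of_mem x hy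
        · by_cases hxy : num - x = x
          · right
            have hyx : y = x := by omega
            rw [List.count_cons_self]
            have h1 : 1 ≤ xs.count x := List.count_pos_iff.mpr (hyx ▸ hy)
            omega
          · exact Or.inl hxy
      · refine ⟨z, List.mem_cons_of_mem x hz, List.mem_cons_of_mem x hmem, ?_⟩
        rcases hcond with h | h
        · exact Or.inl h
        · right
          have := (List.sublist_cons_self x xs).count_le z
          omega
    · rintro ⟨z, hz, hmem, hcond⟩
      rcases List.mem_cons.mp hz with rfl | hz'
      · rcases List.mem_cons.mp hmem with heq | hmem'
        · rcases hcond with h | h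
          · exact absurd heq h
          · rw [List.count_cons_self] at h
            have hx : z ∈ xs := List.count_pos_iff.mp (by omega)
            exact Or.inl ⟨z, hx, by rw [beq_iff_eq]; omega⟩
        · exact Or.inl ⟨num - z, hmem', by rw [beq_iff_eq]; ring⟩
      · by_cases hzx : num - z = x
        · exact Or.inl ⟨z, hz', by rw [beq_iff_eq]; omega⟩
        · have hmem' : num - z ∈ xs := by
            rcases List.mem_cons.mp hmem with h | h
            · exact absurd h hzx
            · exact h
          rcases hcond with h | h
          · exact Or.inr ⟨z, hz', hmem', Or.inl h⟩
          · by_cases hzz : num - z = z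
            · have hne : z ≠ x := fun he => hzx (he ▸ hzz)
              have h' : 2 ≤ xs.count z := by simp [Ne.symm hne] at h; omega
              exact Or.inr ⟨z, hz', hmem', Or.inr h'⟩
            · exact Or.inr ⟨z, hz', hmem', Or.inl hzz⟩

-- find? over a filtered list (no library lemma found for this shape)
theorem find?_filter_eq (l : List (Int × Int)) (q r : Int × Int → Bool) :
    (l.filter r).find? q = l.find? (fun x => q x && r x) := by
  induction l with
  | nil => rfl
  | cons x xs ih =>
    by_cases hr : r x <;> by_cases hq : q x <;> simp [hr, hq, ih]

theorem dict_get?_erase (d : PySem.Dict Int Int) (k v : Int) :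
    (d.erase k).get? v = if v = k then none else d.get? v := by
  simp only [PySem.Dict.erase, PySem.Dict.get?]
  rw [find?_filter_eq]
  split
  · rename_i hv
    subst hv
    rw [List.find?_eq_none.mpr]
    · rfl
    · intro p _; simp
  · rename_i hv
    have hfun : (fun p : Int × Int => p.1 == v && !(p.1 == k)) = (fun p : Int × Int => p.1 == v) := by
      funext p
      by_cases hp : p.1 = v <;> simp [hp, hv]
    rw [hfun]

theorem dict_getD_erase (d : PySem.Dict Int Int) (k v : Int) :
    (d.erase k).getD v 0 = if v = k then 0 else d.getD v 0 := by
  rw [PySem.Dict.getD_eq_get?_getD, dict_get?_erase]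
  split <;> simp [PySem.Dict.getD_eq_get?_getD]

theorem dict_contains_erase (d : PySem.Dict Int Int) (k v : Int) :
    (d.erase k).contains v = true ↔ (v ≠ k ∧ d.contains v = true) := by
  rw [PySem.Dict.contains_eq_isSome_get?, PySem.Dict.contains_eq_isSome_get?, dict_get?_erase]
  split <;> simp_all

theorem dict_nodup_keys_erase (d : PySem.Dict Int Int) (k : Int) (h : d.keys.Nodup) :
    (d.erase k).keys.Nodup := by
  have hf : (d.items.filter (fun p => !p.1 == k)).Sublist d.items := List.filter_sublist
  exact h.sublist (show (d.erase k).keys.Sublist d.keys from hf.map (fun p : Int × Int => p.1))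

-- the counts dict represents the window multiset: nodup keys, counts, membership
def CInv (d : PySem.Dict Int Int) (w : List Int) : Prop :=
  d.keys.Nodup ∧ (∀ v, d.getD v 0 = (w.count v : Int)) ∧ (∀ v, d.contains v = true ↔ v ∈ w)

theorem CInv_counter (xs : List Int) : CInv (PySem.Dict.counter xs) xs := by
  refine ⟨PySem.Dict.nodup_keys_counter xs, fun v => PySem.Dict.getD_counter xs v, fun v => ?_⟩
  rw [PySem.Dict.contains_counter]
  simp

theorem check_eq (num : Int) (d : PySem.Dict Int Int) (w : List Int) (h : CInv d w) :
    ffinCheck num d = is_valid num w := by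
  obtain ⟨hnd, hc, hm⟩ := h
  have hiff : ffinCheck num d = true ↔ is_valid num w = true := by
    rw [valid_iff]
    unfold ffinCheck
    rw [List.any_eq_true]
    constructor
    · rintro ⟨x, hx, hp⟩
      rw [Bool.and_eq_true, Bool.or_eq_true] at hp
      obtain ⟨hcontains, hrest⟩ := hp
      have hxw : x ∈ w := (hm x).mp ((PySem.Dict.contains_iff_mem_keys d x).mpr hx)
      have hyw : num - x ∈ w := (hm _).mp hcontains
      refine ⟨x, hxw, hyw, ?_⟩
      rcases hrest with h | h
      · left; simpa using h
      · right
        rw [decide_eq_true_iff, hc x] at h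
        omega
    · rintro ⟨x, hxw, hyw, hcond⟩
      refine ⟨x, (PySem.Dict.contains_iff_mem_keys d x).mp ((hm x).mpr hxw), ?_⟩
      rw [Bool.and_eq_true, Bool.or_eq_true]
      refine ⟨(hm _).mpr hyw, ?_⟩
      rcases hcond with h | h
      · left; simpa using h
      · right
        rw [decide_eq_true_iff, hc x]
        omega
  cases h1 : ffinCheck num d <;> cases h2 : is_valid num w <;> simp_all

-- sliding the window by one step preserves the invariant
theorem CInv_slide (d : PySem.Dict Int Int) (old num : Int) (w : List Int)
    (h : CInv d (old :: w)) :
    CInv ((if (d.modify old 0 (· - 1)).getD old 0 == 0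
             then (d.modify old 0 (· - 1)).erase old
             else d.modify old 0 (· - 1)).insert num
           ((if (d.modify old 0 (· - 1)).getD old 0 == 0
             then (d.modify old 0 (· - 1)).erase old
             else d.modify old 0 (· - 1)).getD num 0 + 1))
      (w ++ [num]) := by
  obtain ⟨hnd, hc, hm⟩ := h
  set c1 := d.modify old 0 (· - 1) with hc1
  have hc1getD : ∀ v, c1.getD v 0 = if v = old then d.getD old 0 - 1 else d.getD v 0 :=
    fun v => PySem.Dict.getD_modify d old v 0 (· - 1)
  have hc1contains : ∀ v, c1.contains v = (v == old || d.contains v) :=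
    fun v => PySem.Dict.contains_modify d old v 0 (· - 1)
  have hc1nd : c1.keys.Nodup := by
    rw [hc1, PySem.Dict.keys_modify]
    have := PySem.Dict.nodup_keys_insert d old (d.getD old 0 - 1) hnd
    simpa using this
  set c2 := if c1.getD old 0 == 0 then c1.erase old else c1 with hc2
  have hc2getD : ∀ v, c2.getD v 0 = (w.count v : Int) := by
    intro v
    rw [hc2]
    split
    · rename_i h0
      rw [beq_iff_eq, hc1getD, if_pos rfl, hc old, List.count_cons_self] at h0
      rw [dict_getD_erase, hc1getD]
      split
      · rename_i hv; subst hv; omega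
      · rename_i hv
        rw [hc v]
        simp [Ne.symm hv]
    · rename_i h0
      rw [beq_iff_eq, hc1getD, if_pos rfl, hc old, List.count_cons_self] at h0
      rw [hc1getD]
      split
      · rename_i hv; subst hv
        rw [hc v, List.count_cons_self]
        omega
      · rename_i hv
        rw [hc v]
        simp [Ne.symm hv]
    -- in the erase branch old has window count 0, so every lookup matches w's counts
  have hc2contains : ∀ v, c2.contains v = true ↔ v ∈ w := by
    intro v
    rw [hc2]
    split
    · rename_i h0
      rw [beq_iff_eq, hc1getD, if_pos rfl, hc old, List.count_cons_self] at h0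
      rw [dict_contains_erase, hc1contains, Bool.or_eq_true, beq_iff_eq, hm v, List.mem_cons]
      constructor
      · rintro ⟨hvne, (h | h)⟩
        · exact absurd h hvne
        · rcases h with h | h
          · exact absurd h hvne
          · exact h
      · intro hv
        have hvo : v ≠ old := by
          intro he; subst he
          have : 1 ≤ w.count v := List.count_pos_iff.mpr hv
          omega
        exact ⟨hvo, Or.inr (Or.inr hv)⟩
    · rename_i h0
      rw [beq_iff_eq, hc1getD, if_pos rfl, hc old, List.count_cons_self] at h0
      rw [hc1contains, Bool.or_eq_true, beq_iff_eq, hm v, List.mem_cons]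
      constructor
      · rintro (h | h | h)
        · subst h
          exact List.count_pos_iff.mp (by omega)
        · subst h
          exact List.count_pos_iff.mp (by omega)
        · exact h
      · intro hv
        exact Or.inr (Or.inr hv)
  have hc2nd : c2.keys.Nodup := by
    rw [hc2]; split
    · exact dict_nodup_keys_erase c1 old hc1nd
    · exact hc1nd
  refine ⟨PySem.Dict.nodup_keys_insert c2 num _ hc2nd, fun v => ?_, fun v => ?_⟩
  · rw [PySem.Dict.getD_insert]
    split
    · rename_i hv; subst hv
      rw [hc2getD]
      have hcnt : (w ++ [v]).count v = w.count v + 1 := by simp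
      rw [hcnt]
      push_cast
      ring
    · rename_i hv
      rw [hc2getD]
      have hcnt : (w ++ [num]).count v = w.count v := by simp [List.count_append, List.count_eq_zero, hv]
      rw [hcnt]
  · rw [PySem.Dict.contains_insert, Bool.or_eq_true, beq_iff_eq, hc2contains, List.mem_append,
        List.mem_singleton]
    tauto

theorem take_cons_head (k : Nat) (hk : 1 ≤ k) (a : Int) (t : List Int) :
    (a :: t).take k = a :: ((a :: t).take k).drop 1 := by
  cases k with
  | zero => omega
  | succ k => simp [List.take_succ_cons]

theorem window_step (nums : List Int) (k i : Nat) (h1 : 1 ≤ k) (hk : k ≤ i) (hi : i < nums.length) :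
    ((nums.drop (i - k)).take k).drop 1 ++ [nums[i]] = (nums.drop (i + 1 - k)).take k := by
  rw [List.drop_take, List.drop_drop]
  have e1 : (i - k) + 1 = i + 1 - k := by omega
  have e2 : k = (k - 1) + 1 := by omega
  rw [e1]
  conv_rhs => rw [e2, List.take_add_one]
  have e3 : i + 1 - (k - 1 + 1) + (k - 1) = i := by omega
  rw [List.getElem?_drop, e3, List.getElem?_eq_getElem hi, ← e2]
  rfl

theorem steady (nums : List Int) (ps : Int) (k : Nat) (hk : k = ps.toNat) :
    ∀ n i d, nums.length - i = n → k ≤ i → CInv d ((nums.drop (i - k)).take k) →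
      ffinGoA ps (nums.drop i) (i : Int) ((nums.drop (i - k)).take k) = ffinGoB nums k i (nums.drop i) d := by
  intro n
  induction n with
  | zero =>
    intro i d hn _ _
    rw [List.drop_eq_nil_of_le (by omega)]
    rfl
  | succ n ih =>
    intro i d hn hki hinv
    have hi : i < nums.length := by omega
    rw [List.drop_eq_getElem_cons hi]
    simp only [ffinGoA, ffinGoB]
    rw [if_neg (by omega : ¬ ((i : Int) < ps))]
    rw [← check_eq nums[i] d ((nums.drop (i - k)).take k) hinv]
    cases hv : ffinCheck nums[i] d with
    | false => simp
    | true =>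
      simp only [Bool.not_true, Bool.false_eq_true, if_false]
      have hvalid : is_valid nums[i] ((nums.drop (i - k)).take k) = true := by
        rw [← check_eq nums[i] d ((nums.drop (i - k)).take k) hinv]; exact hv
      have hk1 : 1 ≤ k := by
        by_contra hcon
        have hk0 : k = 0 := by omega
        rw [hk0, List.take_zero] at hvalid
        simp [is_valid, pyCombs2] at hvalid
      -- decompose the window as old :: tail
      have hik : i - k < nums.length := by omega
      have hw : (nums.drop (i - k)).take k
          = nums.getD (i - k) 0 :: ((nums.drop (i - k)).take k).drop 1 := by
        rw [List.drop_eq_getElem_cons hik, List.getD_eq_getElem nums 0 hik]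
        exact take_cons_head k hk1 _ _
      have hstep := window_step nums k i hk1 hki hi
      have hinv' := CInv_slide d (nums.getD (i - k) 0) nums[i]
          (((nums.drop (i - k)).take k).drop 1) (hw ▸ hinv)
      rw [hstep] at hinv'
      rw [hstep, show ((i : Int) + 1) = ((i + 1 : Nat) : Int) by push_cast; ring]
      exact ih (i + 1) _ (by omega) (by omega) hinv'

theorem phase1 (nums : List Int) (ps : Int) (k : Nat) (hk : k = ps.toNat) :
    ∀ m j, k - j = m → j ≤ k →
      ffinGoA ps (nums.drop j) (j : Int) (nums.take j) = ffinGoA ps (nums.drop k) (k : Int) (nums.take k) := by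
  intro m
  induction m with
  | zero =>
    intro j h hj
    have : j = k := by omega
    subst this; rfl
  | succ m ih =>
    intro j h hj
    have hjk : j < k := by omega
    by_cases hlen : j < nums.length
    · rw [List.drop_eq_getElem_cons hlen]
      simp only [ffinGoA]
      rw [if_pos (by omega : (j : Int) < ps)]
      have ht : nums.take j ++ [nums[j]] = nums.take (j + 1) := by
        rw [List.take_add_one, List.getElem?_eq_getElem hlen]
        rfl
      rw [ht, show ((j : Int) + 1) = ((j + 1 : Nat) : Int) by push_cast; ring]
      exact ih (j + 1) (by omega) (by omega)
    · rw [List.drop_eq_nil_of_le (by omega : nums.length ≤ j),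
          List.drop_eq_nil_of_le (by omega : nums.length ≤ k)]
      rfl

theorem ports_agree (numbers : List Int) (preamble_size : Int) :
    find_first_invalid_num numbers preamble_size = find_first_invalid_num_alt numbers preamble_size := by
  unfold find_first_invalid_num find_first_invalid_num_alt
  have hK : (max preamble_size 0).toNat = preamble_size.toNat := by omega
  rw [hK]
  congr 1
  have h0 : ffinGoA preamble_size numbers 0 [] =
      ffinGoA preamble_size (numbers.drop 0) ((0 : Nat) : Int) (numbers.take 0) := rfl
  rw [h0, phase1 numbers preamble_size preamble_size.toNat rfl (preamble_size.toNat - 0) 0 rfl (by omega)]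
  rw [PySem.Dict.foldl_insert_getD_add_one_eq_counter]
  have h1 := steady numbers preamble_size preamble_size.toNat rfl
      (numbers.length - preamble_size.toNat) preamble_size.toNat
      (PySem.Dict.counter (numbers.take preamble_size.toNat)) rfl (le_refl _)
      (by rw [Nat.sub_self, List.drop_zero]; exact CInv_counter _)
  rw [Nat.sub_self, List.drop_zero] at h1
  exact h1

-- ===== VERDICT (by name: the statement is the Claim_ definition above) =====
theorem find_first_invalid_num_spec : Claim_equal_find_first_invalid_num := by
  intro numbers preamble_size _ _
  unfold Spec_find_first_invalid_num
  exact ports_agree numbers preamble_size
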